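-- pv_equiv track=rewrite | github.com/Miyuutsu/shimmie2-tools | functions/source_resolver.py | get_source_score
-- ===== SOURCE A (Python) =====
-- def get_source_score(url):
--     """Returns the priority score for a given URL. Lower is better."""
--     source_priority = {
--         "pixiv.net": 1, "fantia.jp": 2, "tumblr.com": 3, "baraag.net": 4,
--         "misskey.io": 5, "pawoo.net": 6, "twitter.com": 7, "x.com": 7,
--         "gelbooru.com": 8, "konachan.com": 9, "kemono.cr": 10,
--         "danbooru.donmai.us": 11, "twimg.com": 12, "yande.re": 13
--     }
--     if not url:
--         return 999
--
--     url_lower = url.lower()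
--     for domain, score in source_priority.items():
--         if domain in url_lower:
--             return score
--     return 100
-- ===== SOURCE B (Python) =====
-- def get_source_score(url):
--     """Returns the priority score for a given URL. Lower is better."""
--     source_priority = {
--         "pixiv.net": 1, "fantia.jp": 2, "tumblr.com": 3, "baraag.net": 4,
--         "misskey.io": 5, "pawoo.net": 6, "twitter.com": 7, "x.com": 7,
--         "gelbooru.com": 8, "konachan.com": 9, "kemono.cr": 10,
--         "danbooru.donmai.us": 11, "twimg.com": 12, "yande.re": 13
--     }
--     if not url:
--         return 999
--     url_lower = url.lower()
--     matches = [score for domain, score in source_priority.items() if domain in url_lower]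
--     return min(matches) if matches else 100
-- ===== Notes on version B (the rewrite author's own statement) =====
-- stated objective: alternative
-- what changed: Replaces the early-return first-match loop by collecting the scores of ALL matching domains and returning their minimum (scores are non-decreasing in insertion order, so the minimum equals the first match); defaults 999/100 kept.
import Mathlib
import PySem

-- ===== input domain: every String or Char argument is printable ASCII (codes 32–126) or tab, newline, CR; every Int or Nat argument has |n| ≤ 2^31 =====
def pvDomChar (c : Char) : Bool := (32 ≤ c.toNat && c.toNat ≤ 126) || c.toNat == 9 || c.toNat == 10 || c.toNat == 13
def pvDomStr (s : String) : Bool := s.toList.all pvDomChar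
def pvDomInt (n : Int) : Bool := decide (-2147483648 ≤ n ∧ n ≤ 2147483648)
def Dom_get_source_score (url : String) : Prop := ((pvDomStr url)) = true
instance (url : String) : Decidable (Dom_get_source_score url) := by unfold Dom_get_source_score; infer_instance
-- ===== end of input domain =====

-- B collects the scores of all matching domains and takes their minimum instead of
-- returning on the first match; equal because scores are non-decreasing in insertion order.

-- ===== PORT A =====
-- the source_priority dict, in insertion order (shared literal of both Pythons)
def pvPriority : List (String × Int) :=
  [("pixiv.net", 1), ("fantia.jp", 2), ("tumblr.com", 3), ("baraag.net", 4),
   ("misskey.io", 5), ("pawoo.net", 6), ("twitter.com", 7), ("x.com", 7),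
   ("gelbooru.com", 8), ("konachan.com", 9), ("kemono.cr", 10),
   ("danbooru.donmai.us", 11), ("twimg.com", 12), ("yande.re", 13)]

-- A's for-loop: return the score of the first domain contained in url_lower, else 100
def pvFirstMatch (ul : String) : List (String × Int) → Int
  | [] => 100
  | (d, s) :: rest => if PySem.Str.isIn d ul then s else pvFirstMatch ul rest

def get_source_score (url : String) : Int :=
  if url = "" then 999
  else pvFirstMatch (PySem.Str.lower url) pvPriority

-- ===== PORT B =====
def get_source_score_alt (url : String) : Int :=
  if url = "" then 999
  else
    let url_lower := PySem.Str.lower url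
    let matchScores := (pvPriority.filter (fun p => PySem.Str.isIn p.1 url_lower)).map (fun p => p.2)
    match PySem.List.min? matchScores (fun x => x) with
    | some m => m
    | none => 100

-- ===== PRECONDITION & SPEC =====
def Spec_get_source_score (url : String) (out : Int) : Prop := out = get_source_score_alt url
instance (url : String) (out : Int) : Decidable (Spec_get_source_score url out) := by unfold Spec_get_source_score; infer_instance

-- ===== CLAIM (what is proved, stated in full; the proofs are below) =====
def Claim_equal_get_source_score : Prop := ∀ (url : String), Dom_get_source_score url → Spec_get_source_score url (get_source_score url)

-- ===== LEMMAS AND PROOFS =====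

-- first match on a list whose scores are non-decreasing = minimum of all matches (100 if none)
theorem pvFirstMatch_eq_min (ul : String) (l : List (String × Int))
    (h : l.Pairwise (fun p q => p.2 ≤ q.2)) :
    pvFirstMatch ul l =
      (match PySem.List.min? ((l.filter (fun p => PySem.Str.isIn p.1 ul)).map (fun p => p.2))
          (fun x => x) with
        | some m => m
        | none => 100) := by
  induction l with
  | nil => simp [pvFirstMatch, PySem.List.min?]
  | cons hd tl ih =>
    obtain ⟨d, s⟩ := hd
    rw [List.pairwise_cons] at h
    by_cases hin : PySem.Str.isIn d ul
    · simp only [pvFirstMatch, hin, if_pos, List.filter_cons, List.map_cons,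
        PySem.List.min?_id_cons]
      have hbnd := PySem.List.foldl_min_le
        ((tl.filter (fun p => PySem.Str.isIn p.1 ul)).map (fun p => p.2)) s
      have hmem := PySem.List.foldl_min_mem
        ((tl.filter (fun p => PySem.Str.isIn p.1 ul)).map (fun p => p.2)) s
      rcases hmem with heq | hm
      · exact heq.symm
      · simp only [List.mem_map, List.mem_filter] at hm
        obtain ⟨p, ⟨hp, _⟩, hps⟩ := hm
        have := h.1 p hp
        omega
    · rw [Bool.not_eq_true] at hin
      simp only [pvFirstMatch, hin, List.filter_cons, Bool.false_eq_true, if_false]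
      exact ih h.2

theorem pvPriority_sorted : pvPriority.Pairwise (fun p q => p.2 ≤ q.2) := by
  unfold pvPriority; decide

-- ===== VERDICT (by name: the statement is the Claim_ definition above) =====
theorem get_source_score_spec : Claim_equal_get_source_score := by
  intro url _
  unfold Spec_get_source_score get_source_score get_source_score_alt
  by_cases h : url = ""
  · simp [h]
  · simp only [h, if_false]
    exact pvFirstMatch_eq_min (PySem.Str.lower url) pvPriority pvPriority_sorted
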